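-- pv_equiv track=rewrite | github.com/R1c4rdCo5t4/AdventOfCode | day18/droplets.py | get_blank_spaces
-- ===== SOURCE A (Python) =====
-- def get_blank_spaces(cubes):
--
--     blank_spaces = set()
--
--     for x, y, z in cubes:
--         if (x-1, y, z) in cubes:
--             continue
--         if (x+1, y, z) in cubes:
--             continue
--         if (x, y-1, z) in cubes:
--             continue
--         if (x, y+1, z) in cubes:
--             continue
--         if (x, y, z-1) in cubes:
--             continue
--         if (x, y, z+1) in cubes:
--             continue
--
--         blank_spaces.add((x, y, z))
--
--     return blank_spaces
-- ===== SOURCE B (Python) =====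
-- def get_blank_spaces(cubes):
--     # Build the set of all neighbor positions of every cube in one pass,
--     # then keep exactly the cubes that are nobody's neighbor (adjacency is symmetric).
--     neighbors = set()
--     for x, y, z in cubes:
--         neighbors.update([(x - 1, y, z), (x + 1, y, z),
--                           (x, y - 1, z), (x, y + 1, z),
--                           (x, y, z - 1), (x, y, z + 1)])
--     return set(cubes) - neighbors
-- ===== Notes on version B (the rewrite author's own statement) =====
-- stated objective: faster
-- what changed: Instead of testing each cube's six neighbors against the list (a linear scan per test), B makes one pass collecting every neighbor position into a hash set and returns set(cubes) minus that set, relying on symmetry of adjacency.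
import Mathlib
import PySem

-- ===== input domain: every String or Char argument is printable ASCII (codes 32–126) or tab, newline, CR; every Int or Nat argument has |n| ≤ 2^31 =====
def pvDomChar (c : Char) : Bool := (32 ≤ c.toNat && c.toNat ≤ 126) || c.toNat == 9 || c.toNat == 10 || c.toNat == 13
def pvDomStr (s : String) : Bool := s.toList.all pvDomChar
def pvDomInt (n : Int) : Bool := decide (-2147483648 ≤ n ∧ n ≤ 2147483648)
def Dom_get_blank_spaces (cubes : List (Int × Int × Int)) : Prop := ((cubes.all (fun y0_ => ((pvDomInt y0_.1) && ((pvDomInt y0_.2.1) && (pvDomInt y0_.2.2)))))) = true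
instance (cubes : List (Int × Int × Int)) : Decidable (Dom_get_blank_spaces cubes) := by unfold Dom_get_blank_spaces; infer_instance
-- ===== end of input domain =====

-- B replaces A's per-cube six list-membership tests by one pass collecting all neighbor
-- positions into a set and a final set difference (faster: adjacency is symmetric).

-- ===== PORT A =====
def get_blank_spaces (cubes : List (Int × Int × Int)) : List (Int × Int × Int) :=
  cubes.foldl (fun blank_spaces c =>
    match c with
    | (x, y, z) =>
      if cubes.contains (x - 1, y, z) then blank_spaces
      else if cubes.contains (x + 1, y, z) then blank_spaces
      else if cubes.contains (x, y - 1, z) then blank_spaces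
      else if cubes.contains (x, y + 1, z) then blank_spaces
      else if cubes.contains (x, y, z - 1) then blank_spaces
      else if cubes.contains (x, y, z + 1) then blank_spaces
      else PySem.Set.add blank_spaces (x, y, z))
    PySem.Set.empty

-- ===== PORT B =====
-- the six neighbor positions of a cube (the list passed to neighbors.update in Source B)
def pvNbrs (c : Int × Int × Int) : List (Int × Int × Int) :=
  [(c.1 - 1, c.2.1, c.2.2), (c.1 + 1, c.2.1, c.2.2),
   (c.1, c.2.1 - 1, c.2.2), (c.1, c.2.1 + 1, c.2.2),
   (c.1, c.2.1, c.2.2 - 1), (c.1, c.2.1, c.2.2 + 1)]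

def get_blank_spaces_alt (cubes : List (Int × Int × Int)) : List (Int × Int × Int) :=
  let neighbors := cubes.foldl (fun s c => PySem.Set.update s (pvNbrs c)) PySem.Set.empty
  PySem.Set.diff (PySem.Set.ofList cubes) neighbors

-- ===== PRECONDITION & SPEC =====
def Spec_get_blank_spaces (cubes : List (Int × Int × Int)) (out : List (Int × Int × Int)) : Prop := out = get_blank_spaces_alt cubes
instance (cubes : List (Int × Int × Int)) (out : List (Int × Int × Int)) : Decidable (Spec_get_blank_spaces cubes out) := by unfold Spec_get_blank_spaces; infer_instance

-- ===== CLAIM (what is proved, stated in full; the proofs are below) =====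
def Claim_equal_get_blank_spaces : Prop := ∀ (cubes : List (Int × Int × Int)), Dom_get_blank_spaces cubes → Spec_get_blank_spaces cubes (get_blank_spaces cubes)

-- ===== LEMMAS AND PROOFS =====

-- A's per-cube test as one boolean: some neighbor of c lies in cubes
def pvBad (cubes : List (Int × Int × Int)) (c : Int × Int × Int) : Bool :=
  (pvNbrs c).any cubes.contains

lemma pvIfChain {S : Type} (b1 b2 b3 b4 b5 b6 : Bool) (s t : S) :
    (if b1 then s else if b2 then s else if b3 then s else if b4 then s
     else if b5 then s else if b6 then s else t)
    = if !(b1 || (b2 || (b3 || (b4 || (b5 || (b6 || false)))))) then t else s := by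
  cases b1 <;> cases b2 <;> cases b3 <;> cases b4 <;> cases b5 <;> cases b6 <;> rfl

lemma pvA_eq_ofList_filter (cubes : List (Int × Int × Int)) :
    get_blank_spaces cubes
      = PySem.Set.ofList (cubes.filter (fun c => !pvBad cubes c)) := by
  unfold get_blank_spaces PySem.Set.ofList
  rw [List.foldl_filter]
  congr 1
  funext s c
  obtain ⟨x, y, z⟩ := c
  show (if cubes.contains (x - 1, y, z) then s
        else if cubes.contains (x + 1, y, z) then s
        else if cubes.contains (x, y - 1, z) then s
        else if cubes.contains (x, y + 1, z) then s
        else if cubes.contains (x, y, z - 1) then s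
        else if cubes.contains (x, y, z + 1) then s
        else PySem.Set.add s (x, y, z))
      = if (!pvBad cubes (x, y, z)) = true then PySem.Set.add s (x, y, z) else s
  rw [pvIfChain]
  rfl

lemma pvFoldl_update (cs : List (Int × Int × Int)) (s : PySem.Set (Int × Int × Int)) :
    cs.foldl (fun s c => PySem.Set.update s (pvNbrs c)) s
      = PySem.Set.update s (cs.flatMap pvNbrs) := by
  induction cs generalizing s with
  | nil => rfl
  | cons c cs ih =>
      simp only [List.foldl_cons, List.flatMap_cons, ih]
      simp [PySem.Set.update, List.foldl_append]

set_option maxHeartbeats 800000 in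
lemma pvNbrs_symm (c d : Int × Int × Int) : c ∈ pvNbrs d ↔ d ∈ pvNbrs c := by
  obtain ⟨x, y, z⟩ := c; obtain ⟨a, b, e⟩ := d
  simp only [pvNbrs, List.mem_cons, List.not_mem_nil, or_false, Prod.mk.injEq]
  constructor <;>
    (rintro (⟨h1, h2, h3⟩ | ⟨h1, h2, h3⟩ | ⟨h1, h2, h3⟩ | ⟨h1, h2, h3⟩ |
             ⟨h1, h2, h3⟩ | ⟨h1, h2, h3⟩) <;> omega)

lemma pvAdd_filter (p : (Int × Int × Int) → Bool) (s : PySem.Set (Int × Int × Int))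
    (x : Int × Int × Int) :
    List.filter p (PySem.Set.add s x)
      = if p x = true then PySem.Set.add (List.filter p s) x else List.filter p s := by
  simp only [PySem.Set.add, PySem.Set.contains]
  by_cases hx : x ∈ s <;> by_cases hp : p x = true <;>
    simp [hx, hp, List.mem_filter, List.filter_append]

lemma pvOfList_filter_gen (p : (Int × Int × Int) → Bool) (xs : List (Int × Int × Int)) :
    ∀ (s : PySem.Set (Int × Int × Int)),
      List.filter p (List.foldl PySem.Set.add s xs)
        = List.foldl (fun t y => if p y = true then PySem.Set.add t y else t)
            (List.filter p s) xs := by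
  induction xs with
  | nil => intro s; rfl
  | cons x xs ih =>
      intro s
      rw [List.foldl_cons, List.foldl_cons, ih (PySem.Set.add s x), pvAdd_filter]

lemma pvOfList_filter (p : (Int × Int × Int) → Bool) (xs : List (Int × Int × Int)) :
    List.filter p (PySem.Set.ofList xs) = PySem.Set.ofList (xs.filter p) := by
  unfold PySem.Set.ofList
  rw [List.foldl_filter]
  exact pvOfList_filter_gen p xs PySem.Set.empty

-- ===== VERDICT (by name: the statement is the Claim_ definition above) =====
theorem get_blank_spaces_spec : Claim_equal_get_blank_spaces := by
  intro cubes _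
  show get_blank_spaces cubes = get_blank_spaces_alt cubes
  rw [pvA_eq_ofList_filter, ← pvOfList_filter]
  unfold get_blank_spaces_alt
  rw [pvFoldl_update]
  have hN : PySem.Set.update PySem.Set.empty (cubes.flatMap pvNbrs)
      = PySem.Set.ofList (cubes.flatMap pvNbrs) := rfl
  rw [hN]
  simp only [PySem.Set.diff, PySem.Set.contains]
  apply List.filter_congr
  intro c _
  have hmem : List.contains (PySem.Set.ofList (cubes.flatMap pvNbrs)) c = pvBad cubes c := by
    rw [Bool.eq_iff_iff, List.contains_iff_mem, PySem.Set.mem_ofList, List.mem_flatMap]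
    simp only [pvBad, List.any_eq_true, List.contains_iff_mem]
    constructor
    · rintro ⟨d, hd, hc⟩; exact ⟨d, (pvNbrs_symm c d).mp hc, hd⟩
    · rintro ⟨d, hd, hc⟩; exact ⟨d, hc, (pvNbrs_symm c d).mpr hd⟩
  rw [hmem]
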